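-- pv_equiv track=rewrite | github.com/kpmerry/Advent-of-Code | 2024 Advent of Code/2/2.py | check_diffs
-- ===== SOURCE A (Python) =====
-- def check_diffs(diffs):
--     """Checks readings and returns True is safe."""
--     pos = []
--     neg = []
--     # Check diff isn't too big.
--     for diff in diffs:
--         if diff > 3 or diff < -3 or diff == 0:
--             return False
--         # Check if all positive.
--         elif diff > 0:
--             pos.append(diff)
--             continue
--         # Check if all neg
--         elif diff < 0:
--             neg.append(diff)
--     if pos == [] or neg == []:
--         return True
--     return False
-- ===== SOURCE B (Python) =====
-- def check_diffs(diffs):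
--     """Checks readings and returns True is safe."""
--     if not diffs:
--         return True
--     lo, hi = min(diffs), max(diffs)
--     return (1 <= lo and hi <= 3) or (-3 <= lo and hi <= -1)
-- ===== Notes on version B (the rewrite author's own statement) =====
-- stated objective: alternative
-- what changed: Replaced A's per-element loop with early return and pos/neg accumulator lists by an aggregate reduction: compute min and max of the list once and decide safety by the closed interval condition (all diffs in [1,3]) or (all in [-3,-1]).
import Mathlib
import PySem

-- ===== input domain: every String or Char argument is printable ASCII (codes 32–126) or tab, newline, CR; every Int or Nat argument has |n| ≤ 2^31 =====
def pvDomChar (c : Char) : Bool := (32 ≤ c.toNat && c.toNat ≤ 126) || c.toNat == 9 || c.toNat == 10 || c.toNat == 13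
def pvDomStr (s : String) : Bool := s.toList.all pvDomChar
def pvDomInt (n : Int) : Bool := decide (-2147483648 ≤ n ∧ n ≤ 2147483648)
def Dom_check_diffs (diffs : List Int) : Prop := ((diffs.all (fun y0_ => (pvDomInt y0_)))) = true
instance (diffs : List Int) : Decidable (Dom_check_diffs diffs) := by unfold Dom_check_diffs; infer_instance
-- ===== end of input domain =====

-- B replaces A's per-element scan with pos/neg accumulator lists by one min/max reduction and a closed interval test (alternative; same cost).

-- ===== PORT A =====
-- literal port of A's loop: the two accumulator lists and the early return
def check_diffs_go (pos neg : List Int) : List Int → Bool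
  | [] => pos == ([] : List Int) || neg == ([] : List Int)
  | diff :: rest =>
    if diff > 3 || diff < -3 || diff == 0 then false
    else if diff > 0 then check_diffs_go (pos ++ [diff]) neg rest
    else if diff < 0 then check_diffs_go pos (neg ++ [diff]) rest
    else check_diffs_go pos neg rest

def check_diffs (diffs : List Int) : Bool := check_diffs_go [] [] diffs

-- ===== PORT B =====
def check_diffs_alt (diffs : List Int) : Bool :=
  if diffs.isEmpty then true
  else
    match PySem.List.min? diffs (fun x => x), PySem.List.max? diffs (fun x => x) with
    | some lo, some hi => (decide (1 ≤ lo) && decide (hi ≤ 3)) || (decide (-3 ≤ lo) && decide (hi ≤ -1))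
    | _, _ => false  -- unreachable: list nonempty

-- ===== PRECONDITION & SPEC =====
def Spec_check_diffs (diffs : List Int) (out : Bool) : Prop := out = check_diffs_alt diffs
instance (diffs : List Int) (out : Bool) : Decidable (Spec_check_diffs diffs out) := by unfold Spec_check_diffs; infer_instance

-- ===== CLAIM (what is proved, stated in full; the proofs are below) =====
def Claim_equal_check_diffs : Prop := ∀ (diffs : List Int), Dom_check_diffs diffs → Spec_check_diffs diffs (check_diffs diffs)

-- ===== LEMMAS AND PROOFS =====

-- characterisation of A's loop, for arbitrary accumulator contents
theorem check_diffs_go_char (diffs : List Int) : ∀ (pos neg : List Int),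
    check_diffs_go pos neg diffs =
      ((!diffs.any (fun d => d == 0 || d > 3 || d < -3)) &&
        ((pos.isEmpty && !diffs.any (fun d => decide (0 < d))) ||
         (neg.isEmpty && !diffs.any (fun d => decide (d < 0))))) := by
  induction diffs with
  | nil => intro pos neg; cases pos <;> cases neg <;> simp [check_diffs_go]
  | cons d rest ih =>
    intro pos neg
    rw [check_diffs_go]
    by_cases hbad : (d > 3 || d < -3 || d == 0) = true
    · rw [if_pos hbad]
      have hb2 : ((d :: rest).any (fun d => d == 0 || d > 3 || d < -3)) = true := by
        simp only [List.any_cons, Bool.or_eq_true, beq_iff_eq, decide_eq_true_eq] at hbad ⊢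
        tauto
      simp [hb2]
    · rw [if_neg hbad]
      simp only [Bool.or_eq_true, beq_iff_eq, decide_eq_true_eq, not_or] at hbad
      obtain ⟨⟨h3, hm3⟩, h0⟩ := hbad
      by_cases hp : d > 0
      · rw [if_pos hp, ih]
        have hne : (pos ++ [d]).isEmpty = false := by simp
        simp [hne, hp, h3, hm3, show ¬d < 0 by omega, show (d == 0) = false by simpa using h0]
      · have hn : d < 0 := by omega
        rw [if_neg hp, if_pos hn, ih]
        have hne : (neg ++ [d]).isEmpty = false := by simp
        simp [hne, hn, h3, hm3, show ¬0 < d by omega, show (d == 0) = false by simpa using h0]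

theorem check_diffs_spec' (diffs : List Int) : check_diffs diffs = check_diffs_alt diffs := by
  unfold check_diffs check_diffs_alt
  rw [check_diffs_go_char]
  cases diffs with
  | nil => simp
  | cons x t =>
    rw [PySem.List.min?_id_cons, PySem.List.max?_id_cons]
    have hlo : ∀ y ∈ x :: t, t.foldl min x ≤ y :=
      PySem.List.min?_isMin (PySem.List.min?_id_cons x t)
    have hhi : ∀ y ∈ x :: t, y ≤ t.foldl max x :=
      PySem.List.max?_isMax (PySem.List.max?_id_cons x t)
    have hlom : t.foldl min x ∈ x :: t :=
      PySem.List.min?_mem (key := fun y => y) (PySem.List.min?_id_cons x t)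
    have hhim : t.foldl max x ∈ x :: t :=
      PySem.List.max?_mem (key := fun y => y) (PySem.List.max?_id_cons x t)
    simp only [List.isEmpty_cons, Bool.false_eq_true, if_false]
    set lo := t.foldl min x with hlodef
    set hi := t.foldl max x with hhidef
    rw [Bool.eq_iff_iff]
    simp only [Bool.and_eq_true, Bool.or_eq_true, Bool.not_eq_true', List.any_eq_false,
      decide_eq_true_eq, List.isEmpty_nil, Bool.true_and, beq_iff_eq]
    constructor
    · rintro ⟨hgood, hsign⟩
      have hx0 : ∀ d ∈ x :: t, d ≠ 0 ∧ d ≤ 3 ∧ -3 ≤ d := by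
        intro d hd
        have := hgood d hd
        simp only [Bool.or_eq_true, not_or] at this
        omega
      rcases hsign with hnp | hnn
      · -- no positive: all negative, all in [-3,-1]
        right
        have h1 : ∀ d ∈ x :: t, d ≤ -1 := by
          intro d hd; have := hx0 d hd; have := hnp d hd; omega
        exact ⟨by have := hx0 lo hlom; omega, h1 hi hhim⟩
      · left
        have h1 : ∀ d ∈ x :: t, 1 ≤ d := by
          intro d hd; have := hx0 d hd; have := hnn d hd; omega
        exact ⟨h1 lo hlom, by have := hx0 hi hhim; omega⟩
    · rintro (⟨h1, h3⟩ | ⟨hm3, hm1⟩)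
      · refine ⟨?_, Or.inr ?_⟩
        · intro d hd
          have := hlo d hd; have := hhi d hd
          simp only [Bool.or_eq_true, not_or]
          omega
        · intro d hd; have := hlo d hd; omega
      · refine ⟨?_, Or.inl ?_⟩
        · intro d hd
          have := hlo d hd; have := hhi d hd
          simp only [Bool.or_eq_true, not_or]
          omega
        · intro d hd; have := hhi d hd; omega

-- ===== VERDICT (by name: the statement is the Claim_ definition above) =====
theorem check_diffs_spec : Claim_equal_check_diffs := by
  intro diffs _
  exact check_diffs_spec' diffs
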